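-- pv_equiv track=rewrite | github.com/dreamerYCJ/shellas | src/graph/nodes/error_handler.py | classify_error_code
-- ===== SOURCE A (Python) =====
-- def classify_error_code(exit_code: int, stderr: str) -> str:
--     s = stderr.lower()
--     if exit_code in (126, 127):
--         return "not_found"
--     if "permission denied" in s:
--         return "permission_denied"
--     if "no space left" in s:
--         return "resource_error"
--     if any(k in s for k in ["syntax error", "invalid option", "unrecognized", "illegal option"]):
--         return "syntax_error"
--     if "timed out" in s or exit_code == 124:
--         return "timeout"
--     if any(k in s for k in ["no such file", "not found", "cannot stat"]):
--         return "not_found"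
--     if "address already in use" in s:
--         return "resource_error"
--     return "unknown"
-- ===== SOURCE B (Python) =====
-- # B: evaluate ALL rules, then pick the best (lowest-priority) hit with min,
-- # instead of A's short-circuiting if/return chain.
-- KEYWORDS = {
--     "permission denied": (1, "permission_denied"),
--     "no space left": (2, "resource_error"),
--     "syntax error": (3, "syntax_error"),
--     "invalid option": (3, "syntax_error"),
--     "unrecognized": (3, "syntax_error"),
--     "illegal option": (3, "syntax_error"),
--     "timed out": (4, "timeout"),
--     "no such file": (5, "not_found"),
--     "not found": (5, "not_found"),
--     "cannot stat": (5, "not_found"),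
--     "address already in use": (6, "resource_error"),
-- }
-- CODES = {126: (0, "not_found"), 127: (0, "not_found"), 124: (4, "timeout")}
--
-- def classify_error_code(exit_code: int, stderr: str) -> str:
--     s = stderr.lower()
--     hits = [pl for kw, pl in KEYWORDS.items() if kw in s]
--     if exit_code in CODES:
--         hits.append(CODES[exit_code])
--     return min(hits, key=lambda pl: pl[0], default=(7, "unknown"))[1]
-- ===== Notes on version B (the rewrite author's own statement) =====
-- stated objective: alternative
-- what changed: Instead of A's short-circuiting if/return chain, B evaluates every rule (keyword map plus exit-code map), collects all fired (priority, label) hits, and returns the label of the minimum-priority hit via min with a default.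
import Mathlib
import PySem

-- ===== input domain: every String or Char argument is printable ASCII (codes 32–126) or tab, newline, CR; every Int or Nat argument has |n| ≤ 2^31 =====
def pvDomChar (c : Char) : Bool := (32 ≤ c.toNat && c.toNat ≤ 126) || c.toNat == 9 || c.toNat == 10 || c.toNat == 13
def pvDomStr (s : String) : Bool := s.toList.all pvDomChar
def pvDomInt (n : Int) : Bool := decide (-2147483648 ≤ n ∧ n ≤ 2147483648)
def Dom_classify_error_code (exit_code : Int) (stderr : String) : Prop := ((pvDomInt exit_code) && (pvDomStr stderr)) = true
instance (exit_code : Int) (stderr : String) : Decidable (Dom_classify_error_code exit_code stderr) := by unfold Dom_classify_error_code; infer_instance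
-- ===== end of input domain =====

-- B evaluates every rule, collects all hits as (priority, label) pairs and returns the label of the minimum hit, instead of A's short-circuiting if/return chain (alternative decomposition, same cost).


-- ===== PORT A =====
def classify_error_code (exit_code : Int) (stderr : String) : String :=
  let s := PySem.Str.lower stderr
  if exit_code == 126 || exit_code == 127 then "not_found"
  else if PySem.Str.isIn "permission denied" s then "permission_denied"
  else if PySem.Str.isIn "no space left" s then "resource_error"
  else if (["syntax error", "invalid option", "unrecognized", "illegal option"].any
            (fun k => PySem.Str.isIn k s)) then "syntax_error"
  else if PySem.Str.isIn "timed out" s || exit_code == 124 then "timeout"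
  else if (["no such file", "not found", "cannot stat"].any
            (fun k => PySem.Str.isIn k s)) then "not_found"
  else if PySem.Str.isIn "address already in use" s then "resource_error"
  else "unknown"

-- ===== PORT B =====
-- KEYWORDS: substring -> (priority, label)
def pvKeywords : List (String × Int × String) :=
  [("permission denied", (1, "permission_denied")),
   ("no space left", (2, "resource_error")),
   ("syntax error", (3, "syntax_error")),
   ("invalid option", (3, "syntax_error")),
   ("unrecognized", (3, "syntax_error")),
   ("illegal option", (3, "syntax_error")),
   ("timed out", (4, "timeout")),
   ("no such file", (5, "not_found")),
   ("not found", (5, "not_found")),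
   ("cannot stat", (5, "not_found")),
   ("address already in use", (6, "resource_error"))]

-- CODES: exit code -> (priority, label)
def pvCodes : PySem.Dict Int (Int × String) :=
  PySem.Dict.mk [(126, (0, "not_found")), (127, (0, "not_found")), (124, (4, "timeout"))]

def classify_error_code_alt (exit_code : Int) (stderr : String) : String :=
  let s := PySem.Str.lower stderr
  let hits := (pvKeywords.filter (fun p => PySem.Str.isIn p.1 s)).map Prod.snd
  let hits2 := match PySem.Dict.get? pvCodes exit_code with
    | some pl => hits ++ [pl]
    | none => hits
  (PySem.List.minD hits2 (fun pl => pl.1) (7, "unknown")).2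

-- ===== PRECONDITION & SPEC =====
def Spec_classify_error_code (exit_code : Int) (stderr : String) (out : String) : Prop := out = classify_error_code_alt exit_code stderr
instance (exit_code : Int) (stderr : String) (out : String) : Decidable (Spec_classify_error_code exit_code stderr out) := by unfold Spec_classify_error_code; infer_instance

-- ===== CLAIM =====
def Claim_equal_classify_error_code : Prop := ∀ (exit_code : Int) (stderr : String), Dom_classify_error_code exit_code stderr → Spec_classify_error_code exit_code stderr (classify_error_code exit_code stderr)

-- ===== LEMMAS AND PROOFS =====
lemma pv_beq_comm (a b : Int) : (a == b) = (b == a) := by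
  by_cases h : a = b <;> simp [h, eq_comm]


-- ===== VERDICT =====
set_option maxHeartbeats 4000000 in
theorem classify_error_code_spec : Claim_equal_classify_error_code := by
  intro exit_code stderr _
  unfold Spec_classify_error_code classify_error_code classify_error_code_alt pvKeywords pvCodes
  simp only [PySem.Dict.get?_mk_cons, List.any_cons,
    List.any_nil, Bool.or_false, List.filter]
  simp only [PySem.Dict.get?, List.find?]
  rw [pv_beq_comm exit_code 126, pv_beq_comm exit_code 127, pv_beq_comm exit_code 124]
  generalize PySem.Str.isIn "permission denied" (PySem.Str.lower stderr) = b1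
  generalize PySem.Str.isIn "no space left" (PySem.Str.lower stderr) = b2
  generalize PySem.Str.isIn "syntax error" (PySem.Str.lower stderr) = b3
  generalize PySem.Str.isIn "invalid option" (PySem.Str.lower stderr) = b4
  generalize PySem.Str.isIn "unrecognized" (PySem.Str.lower stderr) = b5
  generalize PySem.Str.isIn "illegal option" (PySem.Str.lower stderr) = b6
  generalize PySem.Str.isIn "timed out" (PySem.Str.lower stderr) = b7
  generalize PySem.Str.isIn "no such file" (PySem.Str.lower stderr) = b8
  generalize PySem.Str.isIn "not found" (PySem.Str.lower stderr) = b9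
  generalize PySem.Str.isIn "cannot stat" (PySem.Str.lower stderr) = b10
  generalize PySem.Str.isIn "address already in use" (PySem.Str.lower stderr) = b11
  generalize ((126:Int) == exit_code) = c1
  generalize ((127:Int) == exit_code) = c2
  generalize ((124:Int) == exit_code) = c3
  revert b1 b2 b3 b4 b5 b6 b7 b8 b9 b10 b11 c1 c2 c3
  decide
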